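-- pv_equiv track=rewrite | github.com/xtimmy86x/ha-elmo-modbus | custom_components/elmo_modbus/coordinator.py | _prepare_address_groups
-- ===== SOURCE A (Python) =====
-- from collections.abc import Iterable, Sequence
--
-- def _prepare_address_groups(
--     addresses: Iterable[int],
-- ) -> tuple[tuple[int, ...], tuple[tuple[int, int, tuple[int, ...]], ...]]:
--     """Return a sorted tuple of addresses and grouped spans for Modbus reads."""
--
--     ordered = tuple(sorted({int(address) for address in addresses}))
--     if not ordered:
--         return (), ()
--
--     groups: list[tuple[int, int, tuple[int, ...]]] = []
--     current: list[int] = [ordered[0]]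
--
--     for address in ordered[1:]:
--         if address == current[-1] + 1:
--             current.append(address)
--             continue
--         groups.append((current[0], len(current), tuple(current)))
--         current = [address]
--
--     groups.append((current[0], len(current), tuple(current)))
--
--     return ordered, tuple(groups)
-- ===== SOURCE B (Python) =====
-- def _prepare_address_groups(addresses):
--     """Return a sorted tuple of addresses and grouped spans for Modbus reads."""
--     pool = {int(address) for address in addresses}
--     ordered = tuple(sorted(pool))
--     groups = []
--     for start in sorted(a for a in pool if a - 1 not in pool):
--         end = start
--         while end + 1 in pool:
--             end += 1
--         groups.append((start, end - start + 1, tuple(range(start, end + 1))))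
--     return ordered, tuple(groups)
-- ===== Notes on version B (the rewrite author's own statement) =====
-- stated objective: alternative
-- what changed: Instead of scanning the sorted list with a running current-run accumulator, B finds run starts purely by set membership (a in the set with a-1 not in it), extends each start upward with membership probes, and materialises each run with range(); the grouping never inspects the sorted sequence.
import Mathlib
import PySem

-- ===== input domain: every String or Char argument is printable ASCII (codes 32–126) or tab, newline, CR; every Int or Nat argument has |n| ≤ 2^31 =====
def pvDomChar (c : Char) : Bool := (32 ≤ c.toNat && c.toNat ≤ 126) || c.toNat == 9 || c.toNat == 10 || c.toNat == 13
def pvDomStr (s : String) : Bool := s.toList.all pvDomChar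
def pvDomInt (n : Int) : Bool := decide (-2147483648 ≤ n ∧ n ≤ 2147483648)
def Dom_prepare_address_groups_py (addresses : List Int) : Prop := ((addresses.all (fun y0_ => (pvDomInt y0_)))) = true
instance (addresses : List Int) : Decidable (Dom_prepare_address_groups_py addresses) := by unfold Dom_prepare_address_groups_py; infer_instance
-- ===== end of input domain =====

-- B replaces A's accumulator scan of the sorted list by set-membership run detection:
-- a run starts at a with a-1 not in the set, is extended by membership probes, and is
-- materialised with range(); objective: alternative, same result.

-- ===== PORT A =====
-- the body of A's for-loop, on state (groups, current)
def pvStepA (st : List (Int × Int × List Int) × List Int) (address : Int) :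
    List (Int × Int × List Int) × List Int :=
  if address = st.2.getLast! + 1 then (st.1, st.2 ++ [address])
  else (st.1 ++ [(st.2.head!, (st.2.length : Int), st.2)], [address])

def prepare_address_groups_py (addresses : List Int) : List Int × (List (Int × Int × List Int)) :=
  let ordered := PySem.List.sorted (PySem.Set.ofList addresses) (fun x => x) false
  match ordered with
  | [] => ([], [])
  | o0 :: rest =>
    let st := rest.foldl pvStepA ([], [o0])
    (ordered, st.1 ++ [(st.2.head!, (st.2.length : Int), st.2)])

-- ===== PORT B =====
-- B's `while end + 1 in pool: end += 1`; the fuel pool.length only makes the loop total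
-- (each iteration consumes a distinct pool element, so it never runs out inside the loop)
def pvExtend (pool : List Int) (e : Int) : Nat → Int
  | 0 => e
  | f + 1 => if (e + 1) ∈ pool then pvExtend pool (e + 1) f else e

def prepare_address_groups_py_alt (addresses : List Int) : List Int × (List (Int × Int × List Int)) :=
  let pool := PySem.Set.ofList addresses
  let ordered := PySem.List.sorted pool (fun x => x) false
  let starts := PySem.List.sorted (pool.filter (fun s => decide ((s - 1) ∉ pool))) (fun x => x) false
  (ordered, starts.map (fun s =>
    (s, pvExtend pool s pool.length - s + 1,
      PySem.List.pyRange s (pvExtend pool s pool.length + 1) 1)))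

-- ===== PRECONDITION & SPEC =====
def Spec_prepare_address_groups_py (addresses : List Int) (out : List Int × (List (Int × Int × List Int))) : Prop := out = prepare_address_groups_py_alt addresses
instance (addresses : List Int) (out : List Int × (List (Int × Int × List Int))) : Decidable (Spec_prepare_address_groups_py addresses out) := by unfold Spec_prepare_address_groups_py; infer_instance

-- ===== CLAIM (what is proved, stated in full; the proofs are below) =====
def Claim_equal_prepare_address_groups_py : Prop := ∀ (addresses : List Int), Dom_prepare_address_groups_py addresses → Spec_prepare_address_groups_py addresses (prepare_address_groups_py addresses)

-- ===== LEMMAS AND PROOFS =====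

-- the span tuple both programs emit for a run g
def pvMk (g : List Int) : Int × Int × List Int := (g.head!, (g.length : Int), g)

-- split off the longest consecutive continuation of `prev` from the front of the list
def pvSplitRun : Int → List Int → List Int × List Int
  | _, [] => ([], [])
  | prev, b :: t =>
    if b = prev + 1 then
      let p := pvSplitRun b t
      (b :: p.1, p.2)
    else ([], b :: t)

theorem pvSplitRun_cons (prev b : Int) (t : List Int) :
    pvSplitRun prev (b :: t)
      = if b = prev + 1 then (b :: (pvSplitRun b t).1, (pvSplitRun b t).2) else ([], b :: t) := rfl

theorem pvSplitRun_append : ∀ (prev : Int) (t : List Int),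
    (pvSplitRun prev t).1 ++ (pvSplitRun prev t).2 = t := by
  intro prev t
  induction t generalizing prev with
  | nil => rfl
  | cons b t ih =>
    rw [pvSplitRun_cons]
    split_ifs with h
    · simpa using ih b
    · rfl

theorem pvSplitRun_snd_length (prev : Int) (t : List Int) :
    (pvSplitRun prev t).2.length ≤ t.length := by
  conv_rhs => rw [← pvSplitRun_append prev t]
  simp

-- maximal consecutive runs of a list
def chunksL : List Int → List (List Int)
  | [] => []
  | a :: t => (a :: (pvSplitRun a t).1) :: chunksL (pvSplitRun a t).2
termination_by l => l.length
decreasing_by simpa using Nat.lt_succ_of_le (pvSplitRun_snd_length a t)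

-- r is the consecutive block a+1, a+2, …
def pvConsec : Int → List Int → Prop
  | _, [] => True
  | a, b :: r => b = a + 1 ∧ pvConsec b r

theorem pvConsec_mem : ∀ (a : Int) (r : List Int), pvConsec a r →
    ∀ x ∈ r, a < x ∧ x ≤ a + r.length := by
  intro a r
  induction r generalizing a with
  | nil => intro _ x hx; simp at hx
  | cons b r ih =>
    rintro ⟨hb, hc⟩ x hx
    rcases List.mem_cons.1 hx with rfl | hx
    · constructor <;> [omega; skip]
      have := r.length; simp; omega
    · have := ih b hc x hx
      simp at *; omega

theorem pvConsec_pred : ∀ (a : Int) (r : List Int), pvConsec a r →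
    ∀ x ∈ r, x - 1 ∈ a :: r := by
  intro a r
  induction r generalizing a with
  | nil => intro _ x hx; simp at hx
  | cons b r ih =>
    rintro ⟨hb, hc⟩ x hx
    rcases List.mem_cons.1 hx with rfl | hx
    · simp [hb]
    · have := ih b hc x hx
      rcases List.mem_cons.1 this with h | h
      · simp [h]
      · simp [h]

theorem pvConsec_range : ∀ (a : Int) (r : List Int), pvConsec a r →
    PySem.List.pyRange a (a + r.length + 1) 1 = a :: r := by
  intro a r
  induction r generalizing a with
  | nil =>
    intro _
    simp [PySem.List.pyRange_one_singleton]
  | cons b r ih =>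
    rintro ⟨hb, hc⟩
    rw [PySem.List.pyRange_one_cons (by simp; omega)]
    have := ih b hc
    have harg : a + 1 = b := hb.symm
    have hlen : a + (↑(b :: r).length : Int) + 1 = b + r.length + 1 := by simp; omega
    rw [hlen, harg, this]

-- structure of pvSplitRun on a strictly increasing list
theorem pvSplitRun_spec : ∀ (prev : Int) (t : List Int), (prev :: t).Pairwise (· < ·) →
    pvConsec prev (pvSplitRun prev t).1 ∧
      ((pvSplitRun prev t).2 = [] ∨ prev + (pvSplitRun prev t).1.length + 1 < (pvSplitRun prev t).2.head!) := by
  intro prev t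
  induction t generalizing prev with
  | nil => intro _; exact ⟨trivial, Or.inl rfl⟩
  | cons b t ih =>
    intro hp
    have hp' : (b :: t).Pairwise (· < ·) := hp.of_cons
    have hb : prev < b := (List.pairwise_cons.1 hp).1 b List.mem_cons_self
    rw [pvSplitRun_cons]
    split_ifs with h
    · obtain ⟨h1, h2⟩ := ih b hp'
      refine ⟨⟨h, h1⟩, ?_⟩
      rcases h2 with h2 | h2
      · exact Or.inl h2
      · right
        simp only [List.length_cons]
        push_cast
        omega
    · exact ⟨trivial, Or.inr (by simp [List.head!]; omega)⟩

theorem pvGetLast_concat (l : List Int) (a : Int) : (l ++ [a]).getLast! = a := by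
  induction l with
  | nil => rfl
  | cons x l ih =>
    cases l with
    | nil => rfl
    | cons y l => simpa using ih

-- A's foldl is prefix-stable in the groups component
theorem pvFoldlA_prefix : ∀ (rest : List Int) (groups : List (Int × Int × List Int)) (cur : List Int),
    rest.foldl pvStepA (groups, cur)
      = (groups ++ (rest.foldl pvStepA ([], cur)).1, (rest.foldl pvStepA ([], cur)).2) := by
  intro rest
  induction rest with
  | nil => intro groups cur; simp
  | cons a rest ih =>
    intro groups cur
    simp only [List.foldl_cons]
    by_cases hc : a = cur.getLast! + 1
    · rw [show pvStepA (groups, cur) a = (groups, cur ++ [a]) by unfold pvStepA; rw [if_pos hc],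
        show pvStepA ([], cur) a = ([], cur ++ [a]) by unfold pvStepA; rw [if_pos hc]]
      exact ih groups (cur ++ [a])
    · rw [show pvStepA (groups, cur) a = (groups ++ [pvMk cur], [a]) by unfold pvStepA; rw [if_neg hc]; rfl,
        show pvStepA ([], cur) a = ([pvMk cur], [a]) by unfold pvStepA; rw [if_neg hc]; rfl]
      rw [ih (groups ++ [pvMk cur]) [a], ih [pvMk cur] [a]]
      simp

-- A's loop with the final flush = the chunk decomposition rendered as spans
theorem pvFoldlA_chunks : ∀ (t cur : List Int), cur ≠ [] →
    (t.foldl pvStepA ([], cur)).1 ++ [pvMk (t.foldl pvStepA ([], cur)).2]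
      = ((cur ++ (pvSplitRun cur.getLast! t).1) :: chunksL (pvSplitRun cur.getLast! t).2).map pvMk := by
  intro t
  induction t with
  | nil => intro cur _; simp [pvSplitRun, chunksL]
  | cons b t ih =>
    intro cur hcur
    simp only [List.foldl_cons]
    by_cases hb : b = cur.getLast! + 1
    · rw [show pvStepA ([], cur) b = ([], cur ++ [b]) by unfold pvStepA; rw [if_pos hb]]
      rw [ih (cur ++ [b]) (by simp)]
      rw [show pvSplitRun cur.getLast! (b :: t) = (b :: (pvSplitRun b t).1, (pvSplitRun b t).2) by
        show (if b = cur.getLast! + 1 then _ else _) = _; rw [if_pos hb]]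
      rw [pvGetLast_concat]
      simp
    · rw [show pvStepA ([], cur) b = ([pvMk cur], [b]) by unfold pvStepA; rw [if_neg hb]; rfl]
      rw [pvFoldlA_prefix t [pvMk cur] [b]]
      have h2 := ih [b] (by simp)
      rw [show ([b] : List Int).getLast! = b from rfl] at h2
      rw [show pvSplitRun cur.getLast! (b :: t) = ([], b :: t) by
        show (if b = cur.getLast! + 1 then _ else _) = _; rw [if_neg hb]]
      show [pvMk cur] ++ (t.foldl pvStepA ([], [b])).1 ++ [pvMk (t.foldl pvStepA ([], [b])).2] = _
      rw [List.append_assoc, h2]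
      show _ = ((cur ++ []) :: chunksL (b :: t)).map pvMk
      rw [show chunksL (b :: t) = (b :: (pvSplitRun b t).1) :: chunksL (pvSplitRun b t).2 from by
        rw [chunksL]]
      simp

-- the fueled while-loop reaches the end of a consecutive block
theorem pvExtend_spec (S : List Int) : ∀ (r : List Int) (prev : Int) (fuel : Nat),
    pvConsec prev r → r.length ≤ fuel → (∀ x ∈ r, x ∈ S) → (prev + r.length + 1) ∉ S →
    pvExtend S prev fuel = prev + r.length := by
  intro r
  induction r with
  | nil =>
    intro prev fuel _ _ _ hnot
    cases fuel with
    | zero => simp [pvExtend]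
    | succ f =>
      show (if (prev + 1) ∈ S then _ else _) = _
      rw [if_neg (by simpa using hnot)]
      simp
  | cons b r ih =>
    rintro prev fuel ⟨hb, hc⟩ hfuel hmem hnot
    cases fuel with
    | zero => simp at hfuel
    | succ f =>
      show (if (prev + 1) ∈ S then _ else _) = _
      rw [if_pos (by rw [show prev + 1 = b by omega]; exact hmem b List.mem_cons_self)]
      rw [show prev + 1 = b by omega]
      rw [ih b f hc (by simpa using hfuel) (fun x hx => hmem x (List.mem_cons_of_mem b hx))
        (by simp only [List.length_cons] at hnot; push_cast at hnot ⊢; convert hnot using 2; omega)]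
      simp
      omega

-- B's filter+map over a strictly increasing list with a faithful membership oracle
-- computes exactly the chunk spans
theorem pvMain (S : List Int) (fuel : Nat) : ∀ (n : Nat) (l : List Int), l.length = n →
    l.Pairwise (· < ·) → l.length ≤ fuel →
    (∀ b ∈ l, ∀ x : Int, b - 1 ≤ x → (x ∈ S ↔ x ∈ l)) →
    (l.filter (fun s => decide ((s - 1) ∉ S))).map
        (fun s => (s, pvExtend S s fuel - s + 1,
          PySem.List.pyRange s (pvExtend S s fuel + 1) 1))
      = (chunksL l).map pvMk := by
  intro n
  induction n using Nat.strong_induction_on with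
  | _ n ih =>
    intro l hn hpw hfuel hS
    match l, hn with
    | [], _ => simp [chunksL]
    | a :: t, hn =>
      obtain ⟨hc, hgap⟩ := pvSplitRun_spec a t hpw
      have happ : (pvSplitRun a t).1 ++ (pvSplitRun a t).2 = t := pvSplitRun_append a t
      set r := (pvSplitRun a t).1 with hr
      set rest := (pvSplitRun a t).2 with hrest
      -- elements of the run are between a and a + r.length
      have hrun_le : ∀ x ∈ a :: r, a ≤ x ∧ x ≤ a + r.length := by
        intro x hx
        rcases List.mem_cons.1 hx with rfl | hx
        · have : (0:Int) ≤ r.length := by positivity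
          omega
        · have := pvConsec_mem a r hc x hx
          omega
      -- elements of the remainder are beyond the gap
      have hrest_pw : rest.Pairwise (· < ·) := by
        refine List.Pairwise.sublist ?_ hpw.of_cons
        rw [← happ]; exact List.sublist_append_right _ _
      have hrest_gt : ∀ x ∈ rest, a + r.length + 1 < x := by
        intro x hx
        rcases hgap with hgap | hgap
        · rw [hgap] at hx; simp at hx
        · cases hrest' : rest with
          | nil => rw [hrest'] at hx; simp at hx
          | cons hd tl =>
            rw [hrest'] at hx hgap
            simp only [List.head!] at hgap
            rcases List.mem_cons.1 hx with rfl | hx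
            · exact hgap
            · have : hd < x := (List.pairwise_cons.1 (hrest' ▸ hrest_pw)).1 x hx
              omega
      have hmem_l : ∀ x : Int, x ∈ a :: t ↔ (x = a ∨ x ∈ r ∨ x ∈ rest) := by
        intro x; rw [← happ]; simp
      have hge : ∀ x ∈ a :: t, a ≤ x := by
        intro x hx
        rcases List.mem_cons.1 hx with rfl | hx
        · omega
        · exact le_of_lt ((List.pairwise_cons.1 hpw).1 x hx)
      -- the filter keeps a and drops the rest of the run
      have hfa : (decide ((a - 1) ∉ S)) = true := by
        simp only [decide_eq_true_eq]
        intro hin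
        have := (hS a List.mem_cons_self (a - 1) (by omega)).1 hin
        have := hge _ this
        omega
      have hfr : ∀ s ∈ r, (decide ((s - 1) ∉ S)) = false := by
        intro s hs
        simp only [decide_eq_false_iff_not, not_not]
        have hsl : s ∈ a :: t := by rw [hmem_l]; exact Or.inr (Or.inl hs)
        refine (hS s hsl (s - 1) (by omega)).2 ?_
        have := pvConsec_pred a r hc s hs
        rw [hmem_l]
        rcases List.mem_cons.1 this with h1 | h1
        · exact Or.inl h1
        · exact Or.inr (Or.inl h1)
      have hfilter : ((a :: t).filter (fun s => decide ((s - 1) ∉ S)))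
          = a :: rest.filter (fun s => decide ((s - 1) ∉ S)) := by
        rw [show a :: t = a :: (r ++ rest) by rw [happ]]
        rw [List.filter_cons, if_pos hfa, List.filter_append,
          List.filter_eq_nil_iff.2 (fun s hs => by simp [hfr s hs]), List.nil_append]
      -- the while loop stops exactly at the end of the run
      have hext : pvExtend S a fuel = a + r.length := by
        refine pvExtend_spec S r a fuel hc ?_ ?_ ?_
        · have h1 : r.length + rest.length = t.length := by
            rw [← happ]; simp
          simp only [List.length_cons] at hfuel; omega
        · intro x hx
          have hxl : x ∈ a :: t := by rw [hmem_l]; exact Or.inr (Or.inl hx)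
          exact (hS x hxl x (by omega)).2 hxl
        · intro hin
          have := (hS a List.mem_cons_self (a + r.length + 1) (by
            have : (0:Int) ≤ r.length := by positivity
            omega)).1 hin
          rw [hmem_l] at this
          rcases this with h1 | h1 | h1
          · have : (0:Int) ≤ r.length := by positivity
            omega
          · have := pvConsec_mem a r hc _ h1; omega
          · have := hrest_gt _ h1; omega
      -- recursive call on the remainder
      have hlen_split : r.length + rest.length = t.length := by rw [← happ]; simp
      have hSrest : ∀ b ∈ rest, ∀ x : Int, b - 1 ≤ x → (x ∈ S ↔ x ∈ rest) := by
        intro b hb x hx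
        have hbgt := hrest_gt b hb
        have hbl : b ∈ a :: t := by rw [hmem_l]; exact Or.inr (Or.inr hb)
        rw [hS b hbl x hx, hmem_l]
        constructor
        · rintro (rfl | h1 | h1)
          · omega
          · have := pvConsec_mem a r hc _ h1; omega
          · exact h1
        · exact fun h1 => Or.inr (Or.inr h1)
      have hih := ih rest.length (by subst hn; simp only [List.length_cons]; omega)
        rest rfl hrest_pw (by simp only [List.length_cons] at hfuel; omega) hSrest
      -- assemble
      rw [hfilter, List.map_cons, hih,
        show chunksL (a :: t) = (a :: r) :: chunksL rest from by rw [chunksL]]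
      rw [List.map_cons]
      congr 1
      rw [hext]
      show (a, a + (r.length : Int) - a + 1, PySem.List.pyRange a (a + r.length + 1) 1) = _
      rw [pvConsec_range a r hc]
      simp only [pvMk, List.head!, List.length_cons]
      refine Prod.ext rfl (Prod.ext ?_ rfl)
      push_cast
      simp

-- ===== VERDICT (by name: the statement is the Claim_ definition above) =====
theorem prepare_address_groups_py_spec : Claim_equal_prepare_address_groups_py := by
  intro addresses _
  show prepare_address_groups_py addresses = prepare_address_groups_py_alt addresses
  unfold prepare_address_groups_py prepare_address_groups_py_alt
  cases h : PySem.List.sorted (PySem.Set.ofList addresses) (fun x => x) false with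
  | nil =>
    have hp := PySem.List.sorted_perm (PySem.Set.ofList addresses) (fun x : Int => x) false
    rw [h] at hp
    have hpool : PySem.Set.ofList addresses = [] := List.perm_nil.1 hp.symm
    simp [hpool, PySem.List.sorted_eq_nil_iff]
  | cons o0 rest =>
    have hpw : (o0 :: rest).Pairwise (· < ·) := by
      rw [← h]; exact PySem.List.sorted_ofList_pairwise_lt (xs := addresses)
    have hper : (o0 :: rest).Perm (PySem.Set.ofList addresses) := by
      rw [← h]; exact PySem.List.sorted_perm _ _ _
    have hmem : ∀ x : Int, x ∈ PySem.Set.ofList addresses ↔ x ∈ (o0 :: rest) :=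
      fun x => (hper.mem_iff (a := x)).symm
    have hstarts : PySem.List.sorted
        ((PySem.Set.ofList addresses).filter (fun s => decide ((s - 1) ∉ PySem.Set.ofList addresses)))
        (fun x => x) false
        = (o0 :: rest).filter (fun s => decide ((s - 1) ∉ PySem.Set.ofList addresses)) := by
      exact PySem.List.sorted_eq_of_perm_of_pairwise_lt _ _ _ (hper.filter _)
        (List.Pairwise.filter _ hpw)
    have hmain := pvMain (PySem.Set.ofList addresses) (PySem.Set.ofList addresses).length
      (o0 :: rest).length (o0 :: rest) rfl hpw (le_of_eq hper.length_eq)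
      (fun b _ x _ => hmem x)
    have hA := pvFoldlA_chunks rest [o0] (by simp)
    rw [show ([o0] : List Int).getLast! = o0 from rfl] at hA
    simp only [h, hstarts]
    refine Prod.ext rfl ?_
    show (rest.foldl pvStepA ([], [o0])).1 ++ [pvMk (rest.foldl pvStepA ([], [o0])).2] = _
    rw [hA, hmain, show chunksL (o0 :: rest) = (o0 :: (pvSplitRun o0 rest).1) :: chunksL (pvSplitRun o0 rest).2 from by rw [chunksL]]
    simp
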